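-- pv_equiv track=rewrite | github.com/u-blox/ucxclient | windows_gui/ucx_wrapper.py | _parse_wifi_status
-- ===== SOURCE A (Python) =====
-- def _parse_wifi_status(response: str) -> str:
--     """Parse WiFi status response"""
--     if "+UNTWST:" in response:
--         # Extract status from response
--         lines = response.split('\n')
--         for line in lines:
--             if "+UNTWST:" in line:
--                 status_part = line.split("+UNTWST:")[1].strip()
--                 if status_part.startswith("0"):
--                     return "Disconnected"
--                 elif status_part.startswith("1"):
--                     return "Connected"
--                 else:
--                     return f"Status: {status_part}"
--     return "Unknown"
-- ===== SOURCE B (Python) =====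
-- def _parse_wifi_status(response: str) -> str:
--     """Parse WiFi status response"""
--     marker = "+UNTWST:"
--     idx = response.find(marker)
--     if idx < 0:
--         return "Unknown"
--     rest = response[idx + len(marker):]
--     nl = rest.find('\n')
--     status_part = (rest if nl == -1 else rest[:nl]).strip()
--     if status_part.startswith("0"):
--         return "Disconnected"
--     if status_part.startswith("1"):
--         return "Connected"
--     return f"Status: {status_part}"
-- ===== Notes on version B (the rewrite author's own statement) =====
-- stated objective: simpler
-- what changed: Replaces splitting the response into lines, looping over them with a per-line containment test and an inner split()[1], by a single find of the marker and direct slicing of the remainder bounded at the next newline.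
-- intended difference: On responses whose marker line contains the +UNTWST: marker a second time, with the text between the two markers not stripping to a status that begins with the digit zero or one, A truncates the status at the repeated marker (an artifact of split()[1]) whereas B returns the whole status text of that line, which is the intended status. — e.g. on _parse_wifi_status("+UNTWST:+UNTWST:2"): A returns "Status: ", B returns "Status: +UNTWST:2"
import Mathlib
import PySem

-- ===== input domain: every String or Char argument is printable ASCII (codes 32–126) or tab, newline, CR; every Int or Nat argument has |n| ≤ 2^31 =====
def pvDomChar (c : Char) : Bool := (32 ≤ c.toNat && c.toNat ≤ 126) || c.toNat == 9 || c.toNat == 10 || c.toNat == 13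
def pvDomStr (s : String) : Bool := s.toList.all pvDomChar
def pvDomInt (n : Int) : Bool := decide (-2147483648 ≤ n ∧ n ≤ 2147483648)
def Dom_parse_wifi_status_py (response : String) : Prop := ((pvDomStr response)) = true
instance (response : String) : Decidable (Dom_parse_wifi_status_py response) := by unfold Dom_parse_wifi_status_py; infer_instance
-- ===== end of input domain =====

-- B replaces A's split-into-lines loop by one find of the marker and a slice bounded at the
-- next newline; on lines with a repeated marker (D_ below) B returns the whole status text
-- where A's split()[1] truncates it.

-- ===== PORT A =====
-- the 'for line in lines: …' loop with its early returns
def pvLoopA : List String → String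
  | [] => "Unknown"
  | line :: rest =>
    if PySem.Str.isIn "+UNTWST:" line then
      -- index [1] always exists here: 'line' contains the marker, so split gives ≥ 2 parts
      let status_part := PySem.Str.strip
        ((PySem.List.pyGet? ((PySem.Str.split? line "+UNTWST:").getD []) 1).getD "")
      if PySem.Str.startswith status_part "0" then "Disconnected"
      else if PySem.Str.startswith status_part "1" then "Connected"
      else "Status: " ++ status_part
    else pvLoopA rest

def parse_wifi_status_py (response : String) : String :=
  if PySem.Str.isIn "+UNTWST:" response then
    pvLoopA ((PySem.Str.split? response "\n").getD [])
  else "Unknown"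

-- ===== PORT B =====
def parse_wifi_status_py_alt (response : String) : String :=
  let idx := PySem.Str.find response "+UNTWST:"
  if idx < 0 then "Unknown"
  else
    let rest := PySem.Str.slice response (some (idx + (PySem.Str.len "+UNTWST:" : Int))) none
    let nl := PySem.Str.find rest "\n"
    let status_part := PySem.Str.strip (if nl = -1 then rest else PySem.Str.slice rest none (some nl))
    if PySem.Str.startswith status_part "0" then "Disconnected"
    else if PySem.Str.startswith status_part "1" then "Connected"
    else "Status: " ++ status_part

-- ===== PRECONDITION & SPEC =====
-- On responses whose marker line contains the +UNTWST: marker a second time, with the text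
-- between the two markers not stripping to a status that begins with the digit zero or one,
-- A truncates the status at the repeated marker (an artifact of split()[1]) whereas B returns
-- the whole status text of that line, which is the intended status.
def D_parse_wifi_status_py (response : String) : Prop :=
  let parts := PySem.Chars.splitOn response.toList "+UNTWST:".toList
  2 < parts.length ∧ '\n' ∉ parts.getD 1 [] ∧
    (PySem.Chars.strip (parts.getD 1 [])).headD '?' ∉ (['0', '1'] : List Char)

instance (response : String) : Decidable (D_parse_wifi_status_py response) := by
  unfold D_parse_wifi_status_py; infer_instance

def Spec_parse_wifi_status_py (response : String) (out : String) : Prop :=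
  ¬ D_parse_wifi_status_py response → out = parse_wifi_status_py_alt response
instance (response : String) (out : String) : Decidable (Spec_parse_wifi_status_py response out) := by
  unfold Spec_parse_wifi_status_py; infer_instance

def pvDiffWitness_parse_wifi_status_py : String := "+UNTWST:+UNTWST:2"
def pvDiffWitnessOut_parse_wifi_status_py : String × String := ("Status: ", "Status: +UNTWST:2")

-- ===== CLAIM (what is proved, stated in full; the proofs are below) =====
def Claim_unchanged_parse_wifi_status_py : Prop :=
  ∀ (response : String), Dom_parse_wifi_status_py response →
    Spec_parse_wifi_status_py response (parse_wifi_status_py response)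

def Claim_changed_parse_wifi_status_py : Prop :=
  Dom_parse_wifi_status_py (pvDiffWitness_parse_wifi_status_py) ∧
  D_parse_wifi_status_py (pvDiffWitness_parse_wifi_status_py) ∧
  parse_wifi_status_py (pvDiffWitness_parse_wifi_status_py) = pvDiffWitnessOut_parse_wifi_status_py.1 ∧
  parse_wifi_status_py_alt (pvDiffWitness_parse_wifi_status_py) = pvDiffWitnessOut_parse_wifi_status_py.2 ∧
  pvDiffWitnessOut_parse_wifi_status_py.1 ≠ pvDiffWitnessOut_parse_wifi_status_py.2

def Claim_exact_parse_wifi_status_py : Prop :=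
  ∀ (response : String), Dom_parse_wifi_status_py response →
    D_parse_wifi_status_py response →
    parse_wifi_status_py response ≠ parse_wifi_status_py_alt response

-- ===== LEMMAS AND PROOFS =====


def pvSplitF (sep : List Char) : List Char → List (List Char)
  | [] => [[]]
  | c :: rest =>
    if sep.isPrefixOf (c :: rest) && !sep.isEmpty then
      [] :: pvSplitF sep (rest.drop (sep.length - 1))
    else
      match pvSplitF sep rest with
      | [] => [[c]]
      | p :: ps => (c :: p) :: ps
termination_by l => l.length
decreasing_by
  all_goals simp
  all_goals omega

theorem pvSplitF_ne_nil (sep l : List Char) : pvSplitF sep l ≠ [] := by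
  match l with
  | [] => simp [pvSplitF.eq_def]
  | c :: rest =>
    rw [pvSplitF.eq_def]
    dsimp only
    split
    · simp
    · cases hF : pvSplitF sep rest <;> simp [hF]

theorem pv_go_eq (sep : List Char) (hsep : sep ≠ []) :
    ∀ (fuel : Nat) (l cur : List Char) (acc : List (List Char)), l.length < fuel →
      PySem.Chars.splitOn.go sep fuel l cur acc =
        acc.reverse ++ ((cur.reverse ++ (pvSplitF sep l).headD []) :: (pvSplitF sep l).tail) := by
  intro fuel
  induction fuel with
  | zero => intro l cur acc h; omega
  | succ n ih =>
    intro l cur acc h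
    match l with
    | [] => simp [PySem.Chars.splitOn.go, pvSplitF]
    | c :: rest =>
      rw [PySem.Chars.splitOn.go]
      by_cases hp : sep.isPrefixOf (c :: rest)
      · simp only [hp, if_true]
        have hsl : 1 ≤ sep.length := List.length_pos_iff.mpr hsep
        have hdrop : (c :: rest).drop sep.length = rest.drop (sep.length - 1) := by
          obtain ⟨k, hk⟩ : ∃ k, sep.length = k + 1 := ⟨sep.length - 1, by omega⟩
          rw [hk]; simp
        rw [hdrop]
        rw [ih (rest.drop (sep.length - 1)) [] (cur.reverse :: acc)
            (by simp only [List.length_drop]; simp at h; omega)]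
        have hF : pvSplitF sep (c :: rest) = [] :: pvSplitF sep (rest.drop (sep.length - 1)) := by
          rw [pvSplitF.eq_def]; simp [hp, hsep]
        rw [hF]
        rcases hne : pvSplitF sep (rest.drop (sep.length - 1)) with _ | ⟨p, ps⟩
        · exact absurd hne (pvSplitF_ne_nil _ _)
        · simp [hne]
      · simp only [hp, if_false]
        rw [ih rest (c :: cur) acc (by simp at h; omega)]
        have hF : pvSplitF sep (c :: rest) =
            match pvSplitF sep rest with
            | [] => [[c]]
            | p :: ps => (c :: p) :: ps := by
          rw [pvSplitF.eq_def]; simp [hp]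
        rcases hne : pvSplitF sep rest with _ | ⟨p, ps⟩
        · exact absurd hne (pvSplitF_ne_nil _ _)
        · rw [hF, hne]; simp

theorem pv_splitOn_eq (sep : List Char) (hsep : sep ≠ []) (s : List Char) :
    PySem.Chars.splitOn s sep = pvSplitF sep s := by
  rw [PySem.Chars.splitOn, pv_go_eq sep hsep _ _ _ _ (by omega)]
  rcases hne : pvSplitF sep s with _ | ⟨p, ps⟩
  · exact absurd hne (pvSplitF_ne_nil _ _)
  · simp
-- occurrence & find lemmas
theorem pv_singleton_prefix (c : Char) (z : List Char) : [c] <+: z ↔ z.head? = some c := by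
  cases z with
  | nil => simp
  | cons a t =>
    constructor
    · intro h
      rcases h with ⟨u, hu⟩
      simp at hu
      simp [hu.1]
    · intro h
      simp at h
      exact ⟨t, by simp [h]⟩

theorem pv_infix_iff (sub s : List Char) : sub <:+: s ↔ ∃ j, sub <+: s.drop j := by
  rw [← PySem.Chars.isIn_iff_infix, ← PySem.Chars.exists_prefix_drop_iff_isIn]

theorem pv_prefix_through (M x y : List Char) (c : Char) (hc : c ∉ M)
    (h : M <+: x ++ c :: y) : M <+: x := by
  rcases h with ⟨t, ht⟩
  by_cases hle : M.length ≤ x.length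
  · have : (M ++ t).take M.length = (x ++ c :: y).take M.length := by rw [ht]
    rw [List.take_left' rfl, List.take_append_of_le_length hle] at this
    rw [this]
    exact List.take_prefix _ _
  · exfalso
    apply hc
    have h1 : (M ++ t)[x.length]? = (x ++ c :: y)[x.length]? := by rw [ht]
    rw [List.getElem?_append_left (by omega), List.getElem?_append_right (by omega)] at h1
    simp at h1
    exact List.mem_of_getElem? h1

theorem pv_occ_split (M x y : List Char) (c : Char) (hc : c ∉ M) (j : Nat) :
    M <+: (x ++ c :: y).drop j ↔
      (j ≤ x.length ∧ M <+: x.drop j) ∨ (x.length < j ∧ M <+: y.drop (j - x.length - 1)) := by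
  by_cases hj : j ≤ x.length
  · rw [List.drop_append_of_le_length hj]
    constructor
    · intro h
      exact Or.inl ⟨hj, pv_prefix_through M _ y c hc h⟩
    · rintro (⟨-, h⟩ | ⟨h, -⟩)
      · exact h.trans (List.prefix_append _ _)
      · omega
  · have hx : (x ++ c :: y).drop j = y.drop (j - x.length - 1) := by
      obtain ⟨k, hk⟩ : ∃ k, j - x.length = k + 1 := ⟨j - x.length - 1, by omega⟩
      rw [List.drop_append, List.drop_eq_nil_of_le (by omega), List.nil_append, hk,
        List.drop_succ_cons]
      simp

    rw [hx]
    constructor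
    · intro h; exact Or.inr ⟨by omega, h⟩
    · rintro (⟨h, -⟩ | ⟨-, h⟩)
      · omega
      · exact h

theorem pv_find_eq_coe (s sub : List Char) (j : Nat) (h1 : sub <+: s.drop j)
    (h2 : ∀ i < j, ¬ sub <+: s.drop i) : PySem.Chars.find s sub = (j : Int) := by
  have hinf : sub <:+: s := (pv_infix_iff sub s).mpr ⟨j, h1⟩
  have hnn : 0 ≤ PySem.Chars.find s sub := (PySem.Chars.find_nonneg_iff _ _).mpr hinf
  obtain ⟨hocc, hmin⟩ := PySem.Chars.find_spec hnn
  rcases Nat.lt_trichotomy (PySem.Chars.find s sub).toNat j with h | h | h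
  · exact absurd hocc (h2 _ h)
  · omega
  · exact absurd h1 (hmin _ h)

theorem pv_find_append_left (M x y : List Char) (c : Char) (hM : M ≠ []) (hc : c ∉ M)
    (h : M <:+: x) : PySem.Chars.find (x ++ c :: y) M = PySem.Chars.find x M := by
  have hnn : 0 ≤ PySem.Chars.find x M := (PySem.Chars.find_nonneg_iff _ _).mpr h
  obtain ⟨hocc, hmin⟩ := PySem.Chars.find_spec hnn
  set j := (PySem.Chars.find x M).toNat with hj
  have hjle : j ≤ x.length := by
    have := hocc.length_le
    have h8 : 1 ≤ M.length := List.length_pos_iff.mpr hM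
    simp [List.length_drop] at this
    omega
  rw [pv_find_eq_coe (x ++ c :: y) M j
      ((pv_occ_split M x y c hc j).mpr (Or.inl ⟨hjle, hocc⟩))
      (fun i hi => by
        intro hcon
        rcases (pv_occ_split M x y c hc i).mp hcon with ⟨-, hl⟩ | ⟨hgt, -⟩
        · exact hmin i hi hl
        · omega)]
  omega

theorem pv_find_append_skip (M x y : List Char) (c : Char) (hM : M ≠ []) (hc : c ∉ M)
    (h : ¬ M <:+: x) :
    PySem.Chars.find (x ++ c :: y) M =
      if M <:+: y then (x.length : Int) + 1 + PySem.Chars.find y M else -1 := by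
  split
  · rename_i hy
    have hnn : 0 ≤ PySem.Chars.find y M := (PySem.Chars.find_nonneg_iff _ _).mpr hy
    obtain ⟨hocc, hmin⟩ := PySem.Chars.find_spec hnn
    set j := (PySem.Chars.find y M).toNat with hj
    rw [pv_find_eq_coe (x ++ c :: y) M (x.length + 1 + j)
        ((pv_occ_split M x y c hc _).mpr (Or.inr ⟨by omega, by
          have : x.length + 1 + j - x.length - 1 = j := by omega
          rw [this]; exact hocc⟩))
        (fun i hi => by
          intro hcon
          rcases (pv_occ_split M x y c hc i).mp hcon with ⟨-, hl⟩ | ⟨hgt, hr⟩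
          · exact h ((pv_infix_iff M x).mpr ⟨i, hl⟩)
          · exact hmin _ (by omega) hr)]
    push_cast
    omega
  · rename_i hy
    rw [PySem.Chars.find_eq_neg_one_iff]
    intro hcon
    obtain ⟨i, hi⟩ := (pv_infix_iff M _).mp hcon
    rcases (pv_occ_split M x y c hc i).mp hi with ⟨-, hl⟩ | ⟨-, hr⟩
    · exact h ((pv_infix_iff M x).mpr ⟨i, hl⟩)
    · exact hy ((pv_infix_iff M y).mpr ⟨_, hr⟩)

theorem pv_find_newline (x y : List Char) (c : Char) (hx : c ∉ x) :
    PySem.Chars.find (x ++ c :: y) [c] = (x.length : Int) := by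
  apply pv_find_eq_coe
  · rw [List.drop_append_of_le_length le_rfl]
    simp [pv_singleton_prefix]
  · intro i hi hcon
    rw [List.drop_append_of_le_length (by omega), pv_singleton_prefix] at hcon
    rcases hd : (x.drop i) with _ | ⟨a, t⟩
    · have := congrArg List.length hd; simp at this; omega
    · rw [hd] at hcon
      simp at hcon
      apply hx
      have : a ∈ x.drop i := by rw [hd]; simp
      rw [hcon] at this
      exact List.mem_of_mem_drop this

theorem pv_find_no_newline (x : List Char) (c : Char) (hx : c ∉ x) :
    PySem.Chars.find x [c] = -1 := by
  rw [PySem.Chars.find_eq_neg_one_iff]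
  intro hcon
  obtain ⟨i, hi⟩ := (pv_infix_iff _ _).mp hcon
  rw [pv_singleton_prefix] at hi
  rcases hd : (x.drop i) with _ | ⟨a, t⟩ <;> rw [hd] at hi
  · simp at hi
  · simp at hi
    apply hx
    have : a ∈ x.drop i := by rw [hd]; simp
    rw [hi] at this
    exact List.mem_of_mem_drop this
-- splitF characterization
theorem pvSplitF_cons (sep : List Char) (c : Char) (rest : List Char) :
    pvSplitF sep (c :: rest) =
      if sep.isPrefixOf (c :: rest) && !sep.isEmpty then
        [] :: pvSplitF sep (rest.drop (sep.length - 1))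
      else
        match pvSplitF sep rest with
        | [] => [[c]]
        | p :: ps => (c :: p) :: ps := by
  rw [pvSplitF.eq_def]

theorem pvSplitF_no_occ (sep l : List Char) (h : ¬ sep <:+: l) : pvSplitF sep l = [l] := by
  induction l with
  | nil => simp [pvSplitF.eq_def]
  | cons c rest ih =>
    rw [pvSplitF_cons]
    have hp : ¬ sep.isPrefixOf (c :: rest) = true := by
      intro hcon
      exact h (List.IsPrefix.isInfix (List.isPrefixOf_iff_prefix.mp hcon))
    have hrest : pvSplitF sep rest = [rest] :=
      ih (fun hcon => h (hcon.trans (List.infix_cons (List.infix_refl _))))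
    simp [hp, hrest]

theorem pvSplitF_occ (sep : List Char) (hsep : sep ≠ []) :
    ∀ (pre suf : List Char),
      (∀ j < pre.length, ¬ sep <+: (pre ++ sep ++ suf).drop j) →
      pvSplitF sep (pre ++ sep ++ suf) = pre :: pvSplitF sep suf := by
  intro pre
  induction pre with
  | nil =>
    intro suf _
    simp only [List.nil_append]
    obtain ⟨d', t', he⟩ : ∃ d' t', sep ++ suf = d' :: t' := by
      rcases hs : sep with _ | ⟨d, t⟩
      · exact absurd hs hsep
      · exact ⟨d, t ++ suf, by simp⟩
    have hpp : sep <+: d' :: t' := by rw [← he]; exact List.prefix_append _ _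
    have hd2 : t'.drop (sep.length - 1) = suf := by
      have h1 : 1 ≤ sep.length := List.length_pos_iff.mpr hsep
      have h2 : (d' :: t').drop sep.length = suf := by
        rw [← he, List.drop_append_of_le_length le_rfl]
        simp
      obtain ⟨k, hk⟩ : ∃ k, sep.length = k + 1 := ⟨sep.length - 1, by omega⟩
      rw [hk, List.drop_succ_cons] at h2
      rw [hk]
      simpa using h2
    have hC : (sep.isPrefixOf (d' :: t') && !sep.isEmpty) = true := by
      simp [List.isPrefixOf_iff_prefix, hpp, hsep]
    rw [he, pvSplitF_cons, if_pos hC, hd2]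
  | cons c pre' ih =>
    intro suf hmin
    have h0 : ¬ sep <+: c :: (pre' ++ sep ++ suf) := by
      have := hmin 0 (by simp)
      simpa using this
    have hrest : pvSplitF sep (pre' ++ sep ++ suf) = pre' :: pvSplitF sep suf := by
      apply ih
      intro j hj
      have := hmin (j + 1) (by simp; omega)
      simpa using this
    have hC : ¬ (sep.isPrefixOf (c :: (pre' ++ sep ++ suf)) && !sep.isEmpty) = true := by
      simp only [Bool.and_eq_true]
      rintro ⟨h1, -⟩
      exact h0 (List.isPrefixOf_iff_prefix.mp h1)
    rw [show (c :: pre') ++ sep ++ suf = c :: (pre' ++ sep ++ suf) from by simp,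
      pvSplitF_cons, if_neg hC, hrest]
-- strip / head lemmas
theorem pv_head_dropWhile (p : Char → Bool) (z : List Char) (c : Char)
    (h : (List.dropWhile p z).head? = some c) : p c = false := by
  induction z with
  | nil => simp at h
  | cons a t ih =>
    rw [List.dropWhile_cons] at h
    split at h
    · exact ih h
    · rename_i hpa
      simp at h
      rw [← h]
      simpa using hpa

theorem pv_prefix_head (x y : List Char) (h : x <+: y) (hx : x ≠ []) : y.head? = x.head? := by
  rcases h with ⟨t, rfl⟩
  cases x <;> simp_all

theorem pv_lstrip_append (x y : List Char) (h : PySem.Chars.lstrip x ≠ []) :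
    PySem.Chars.lstrip (x ++ y) = PySem.Chars.lstrip x ++ y := by
  rw [PySem.Chars.lstrip, PySem.Chars.lstrip] at *
  rw [List.dropWhile_append]
  simp only [List.isEmpty_iff]
  rw [if_neg h]

theorem pv_rstrip_prefix (w : List Char) : PySem.Chars.rstrip w <+: w := by
  rw [PySem.Chars.rstrip]
  have hs := List.dropWhile_suffix (l := w.reverse) (p := PySem.Chars.isspace)
  have := List.reverse_prefix.mpr hs
  simpa using this

theorem pv_rstrip_ne_nil (w : List Char) (c : Char) (hh : w.head? = some c)
    (hc : PySem.Chars.isspace c = false) : PySem.Chars.rstrip w ≠ [] := by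
  rw [PySem.Chars.rstrip]
  intro hcon
  rw [List.reverse_eq_nil_iff, List.dropWhile_eq_nil_iff] at hcon
  have hcw : c ∈ w.reverse := by
    rcases w with _ | ⟨a, t⟩
    · simp at hh
    · simp at hh
      simp [hh]
  have := hcon c hcw
  rw [hc] at this
  exact Bool.false_ne_true this

theorem pv_strip_head (z : List Char) (h : PySem.Chars.strip z ≠ []) :
    (PySem.Chars.strip z).head? = (PySem.Chars.lstrip z).head? := by
  rw [PySem.Chars.strip] at *
  exact (pv_prefix_head _ _ (pv_rstrip_prefix _) h).symm

theorem pv_strip_take_head (x : List Char) (k : Nat) (c : Char)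
    (hc : (PySem.Chars.strip (x.take k)).head? = some c) :
    (PySem.Chars.strip x).head? = some c := by
  have htne : PySem.Chars.strip (x.take k) ≠ [] := by
    intro hcon; rw [hcon] at hc; simp at hc
  have h1 : (PySem.Chars.lstrip (x.take k)).head? = some c := by
    rw [← pv_strip_head _ htne]; exact hc
  have hlne : PySem.Chars.lstrip (x.take k) ≠ [] := by
    intro hcon; rw [hcon] at h1; simp at h1
  have hcsp : PySem.Chars.isspace c = false := pv_head_dropWhile _ _ _ h1
  have h2 : PySem.Chars.lstrip x = PySem.Chars.lstrip (x.take k) ++ x.drop k := by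
    conv_lhs => rw [← List.take_append_drop k x]
    exact pv_lstrip_append _ _ hlne
  have h3 : (PySem.Chars.lstrip x).head? = some c := by
    rw [h2]
    rcases hl : PySem.Chars.lstrip (x.take k) with _ | ⟨a, t⟩
    · exact absurd hl hlne
    · rw [hl] at h1; simpa using h1
  have h4 : PySem.Chars.strip x ≠ [] := by
    rw [PySem.Chars.strip]
    exact pv_rstrip_ne_nil _ c h3 hcsp
  rw [pv_strip_head _ h4, h3]

-- takeWhile lemmas
theorem pv_takeWhile_all (p : Char → Bool) (x : List Char) (h : ∀ a ∈ x, p a = true) :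
    List.takeWhile p x = x := by
  induction x with
  | nil => simp
  | cons a t ih =>
    rw [List.takeWhile_cons, if_pos (h a (by simp))]
    rw [ih (fun b hb => h b (by simp [hb]))]

theorem pv_takeWhile_append_stop (p : Char → Bool) (x y : List Char) (c : Char)
    (hx : ∀ a ∈ x, p a = true) (hc : p c = false) :
    List.takeWhile p (x ++ c :: y) = x := by
  induction x with
  | nil => simp [List.takeWhile_cons, hc]
  | cons a t ih =>
    rw [List.cons_append, List.takeWhile_cons, if_pos (hx a (by simp))]
    rw [ih (fun b hb => hx b (by simp [hb]))]
-- chars-level reformulations of the two ports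
def pvM : List Char := "+UNTWST:".toList

def pvClassify (t : List Char) : String :=
  if PySem.Chars.startswith t ['0'] then "Disconnected"
  else if PySem.Chars.startswith t ['1'] then "Connected"
  else "Status: " ++ String.ofList t

def pvLoopC : List (List Char) → String
  | [] => "Unknown"
  | l :: rest =>
    if PySem.Chars.isIn pvM l then
      pvClassify (PySem.Chars.strip ((PySem.List.pyGet? (PySem.Chars.splitOn l pvM) 1).getD []))
    else pvLoopC rest

def pvAC (s : List Char) : String :=
  if PySem.Chars.isIn pvM s then pvLoopC (PySem.Chars.splitOn s ['\n']) else "Unknown"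

def pvBC2 (rest : List Char) : String :=
  pvClassify (PySem.Chars.strip
    (if PySem.Chars.find rest ['\n'] = -1 then rest
     else rest.take (PySem.Chars.find rest ['\n']).toNat))

def pvBC (s : List Char) : String :=
  if PySem.Chars.find s pvM < 0 then "Unknown"
  else pvBC2 (s.drop ((PySem.Chars.find s pvM).toNat + 8))

def pvBadLine (line : List Char) : Prop :=
  PySem.Chars.isIn pvM line = true ∧
    (PySem.Chars.strip (line.take (PySem.Chars.find line pvM).toNat)).headD '?' ∉ (['0', '1'] : List Char)

def pvDC (s : List Char) : Prop :=
  0 ≤ PySem.Chars.find s pvM ∧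
    pvBadLine ((s.drop ((PySem.Chars.find s pvM).toNat + 8)).takeWhile (· ≠ '\n'))

-- bridges: the String ports compute the chars-level functions
theorem pv_pyGet?_map {α β : Type} (f : α → β) (xs : List α) (i : Int) :
    PySem.List.pyGet? (xs.map f) i = (PySem.List.pyGet? xs i).map f := by
  unfold PySem.List.pyGet?
  rw [List.length_map]
  cases PySem.List.pyIdx? xs.length i <;> simp

theorem pv_classify_str (sp : String) :
    (if PySem.Str.startswith sp "0" then "Disconnected"
     else if PySem.Str.startswith sp "1" then "Connected"
     else "Status: " ++ sp) = pvClassify sp.toList := by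
  unfold pvClassify
  rw [show PySem.Str.startswith sp "0" = PySem.Chars.startswith sp.toList ['0'] from rfl,
    show PySem.Str.startswith sp "1" = PySem.Chars.startswith sp.toList ['1'] from rfl,
    show String.ofList sp.toList = sp from by simp]

theorem pv_loop_eq (ls : List (List Char)) : pvLoopA (ls.map String.ofList) = pvLoopC ls := by
  induction ls with
  | nil => rfl
  | cons l rest ih =>
    rw [List.map_cons]
    show pvLoopA (String.ofList l :: rest.map String.ofList) = pvLoopC (l :: rest)
    rw [pvLoopA, pvLoopC]
    have hisin : PySem.Str.isIn "+UNTWST:" (String.ofList l) = PySem.Chars.isIn pvM l := by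
      simp [PySem.Str.isIn, pvM]
    rw [hisin]
    by_cases h : PySem.Chars.isIn pvM l = true
    · rw [if_pos h, if_pos h]
      have hsplit : PySem.Str.split? (String.ofList l) "+UNTWST:" =
          some ((PySem.Chars.splitOn l pvM).map String.ofList) := by
        rw [PySem.Str.split?, PySem.Chars.split?]
        simp [pvM]
      rw [hsplit]
      simp only [Option.getD_some]
      rw [pv_pyGet?_map]
      have hgd : ((PySem.List.pyGet? (PySem.Chars.splitOn l pvM) 1).map String.ofList).getD "" =
          String.ofList ((PySem.List.pyGet? (PySem.Chars.splitOn l pvM) 1).getD []) := by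
        cases PySem.List.pyGet? (PySem.Chars.splitOn l pvM) 1 <;> simp
      rw [hgd]
      have hstrip : PySem.Str.strip (String.ofList ((PySem.List.pyGet? (PySem.Chars.splitOn l pvM) 1).getD [])) =
          String.ofList (PySem.Chars.strip ((PySem.List.pyGet? (PySem.Chars.splitOn l pvM) 1).getD [])) := by
        rw [PySem.Str.strip]
        simp
      rw [hstrip]
      rw [pv_classify_str]
      simp
    · rw [if_neg h, if_neg h, ih]

theorem pv_A_eq (r : String) : parse_wifi_status_py r = pvAC r.toList := by
  unfold parse_wifi_status_py pvAC
  have hisin : PySem.Str.isIn "+UNTWST:" r = PySem.Chars.isIn pvM r.toList := rfl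
  rw [hisin]
  by_cases h : PySem.Chars.isIn pvM r.toList = true
  · rw [if_pos h, if_pos h]
    have hsplit : PySem.Str.split? r "\n" =
        some ((PySem.Chars.splitOn r.toList ['\n']).map String.ofList) := by
      rw [PySem.Str.split?, PySem.Chars.split?]
      simp
    rw [hsplit]
    simp only [Option.getD_some]
    exact pv_loop_eq _
  · rw [if_neg h, if_neg h]

theorem pv_B_eq (r : String) : parse_wifi_status_py_alt r = pvBC r.toList := by
  unfold parse_wifi_status_py_alt pvBC pvBC2
  have hfind : PySem.Str.find r "+UNTWST:" = PySem.Chars.find r.toList pvM := rfl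
  simp only [hfind]
  by_cases h : PySem.Chars.find r.toList pvM < 0
  · rw [if_pos h, if_pos h]
  · rw [if_neg h, if_neg h]
    have hnn : 0 ≤ PySem.Chars.find r.toList pvM := by omega
    have hlen : (PySem.Str.len "+UNTWST:" : Int) = 8 := by decide
    have hrest : (PySem.Str.slice r (some (PySem.Chars.find r.toList pvM + (PySem.Str.len "+UNTWST:" : Int))) none).toList =
        r.toList.drop ((PySem.Chars.find r.toList pvM).toNat + 8) := by
      rw [hlen, PySem.Str.slice]
      simp only [String.toList_ofList]
      rw [PySem.Chars.slice_eq_listSlice]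
      rw [PySem.List.slice_from r.toList (show (0:Int) ≤ PySem.Chars.find r.toList pvM + 8 by omega)]
      congr 1
      omega
    set i := PySem.Chars.find r.toList pvM with hi
    set rest := PySem.Str.slice r (some (i + (PySem.Str.len "+UNTWST:" : Int))) none with hrestdef
    have hfind2 : PySem.Str.find rest "\n" =
        PySem.Chars.find (r.toList.drop (i.toNat + 8)) ['\n'] := by
      rw [PySem.Str.find, hrest]
      congr 1
    rw [hfind2]
    set nl := PySem.Chars.find (r.toList.drop (i.toNat + 8)) ['\n'] with hnl
    by_cases hnl1 : nl = -1
    · rw [if_pos hnl1, if_pos hnl1]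
      have : (PySem.Str.strip rest).toList = PySem.Chars.strip (r.toList.drop (i.toNat + 8)) := by
        rw [PySem.Str.strip]
        simp [hrest]
      rw [show PySem.Str.strip rest = String.ofList (PySem.Chars.strip (r.toList.drop (i.toNat + 8))) from by
        rw [PySem.Str.strip, hrest]]
      rw [pv_classify_str]
      simp
    · rw [if_neg hnl1, if_neg hnl1]
      have hnlnn : 0 ≤ nl := by
        have := PySem.Chars.neg_one_le_find (r.toList.drop (i.toNat + 8)) ['\n']
        rw [← hnl] at this
        omega
      have hslice : (PySem.Str.slice rest none (some nl)).toList =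
          (r.toList.drop (i.toNat + 8)).take nl.toNat := by
        rw [PySem.Str.slice]
        simp only [String.toList_ofList]
        rw [PySem.Chars.slice_eq_listSlice, PySem.List.slice_to rest.toList hnlnn, hrest]
      rw [show PySem.Str.strip (PySem.Str.slice rest none (some nl)) =
          String.ofList (PySem.Chars.strip ((r.toList.drop (i.toNat + 8)).take nl.toNat)) from by
        rw [PySem.Str.strip, hslice]]
      rw [pv_classify_str]
      simp
-- marker facts
theorem pvM_ne_nil : pvM ≠ [] := by decide
theorem pvM_no_nl : '\n' ∉ pvM := by decide
theorem pvM_len : pvM.length = 8 := by decide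

theorem pv_not_infix_singleton (c : Char) (x : List Char) (h : c ∉ x) : ¬ [c] <:+: x := by
  intro hcon
  obtain ⟨j, hj⟩ := (pv_infix_iff _ _).mp hcon
  rw [pv_singleton_prefix] at hj
  exact h (List.mem_of_getElem? (by rw [← List.head?_drop]; exact hj))

theorem pv_occ_le (M x : List Char) (j : Nat) (hM : M ≠ []) (hj : M <+: x.drop j) :
    j ≤ x.length := by
  have h1 := hj.length_le
  have h2 : 1 ≤ M.length := List.length_pos_iff.mpr hM
  simp [List.length_drop] at h1
  omega

theorem pv_infix_append_cons (M x y : List Char) (c : Char) (hM : M ≠ []) (hc : c ∉ M) :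
    (M <:+: x ++ c :: y) ↔ (M <:+: x ∨ M <:+: y) := by
  rw [pv_infix_iff, pv_infix_iff, pv_infix_iff]
  constructor
  · rintro ⟨j, hj⟩
    rcases (pv_occ_split M x y c hc j).mp hj with ⟨-, h⟩ | ⟨-, h⟩
    · exact Or.inl ⟨_, h⟩
    · exact Or.inr ⟨_, h⟩
  · rintro (⟨j, hj⟩ | ⟨j, hj⟩)
    · exact ⟨j, (pv_occ_split M x y c hc j).mpr (Or.inl ⟨pv_occ_le M x j hM hj, hj⟩)⟩
    · refine ⟨x.length + 1 + j, (pv_occ_split M x y c hc _).mpr (Or.inr ⟨by omega, ?_⟩)⟩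
      rw [show x.length + 1 + j - x.length - 1 = j from by omega]
      exact hj

theorem pv_pyGet?_one {α : Type} (a b : α) (rest : List α) :
    PySem.List.pyGet? (a :: b :: rest) 1 = some b := by
  simp [PySem.List.pyGet?, PySem.List.pyIdx?]

theorem pv_classify_eq_of_head (t u : List Char) (c : Char)
    (h1 : t.head? = some c) (h2 : u.head? = some c) (hc : c = '0' ∨ c = '1') :
    pvClassify t = pvClassify u := by
  have hsw : ∀ (v : List Char) (d : Char),
      (PySem.Chars.startswith v [d] = true) ↔ v.head? = some d := by
    intro v d
    rw [PySem.Chars.startswith_iff, pv_singleton_prefix]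
  unfold pvClassify
  rcases hc with rfl | rfl
  · rw [if_pos ((hsw t '0').mpr h1), if_pos ((hsw u '0').mpr h2)]
  · have ht0 : ¬ PySem.Chars.startswith t ['0'] = true := by
      rw [hsw, h1]
      intro hx
      exact absurd (Option.some.inj hx) (by decide)
    have hu0 : ¬ PySem.Chars.startswith u ['0'] = true := by
      rw [hsw, h2]
      intro hx
      exact absurd (Option.some.inj hx) (by decide)
    rw [if_neg ht0, if_neg hu0, if_pos ((hsw t '1').mpr h1), if_pos ((hsw u '1').mpr h2)]

-- the heart: on the marker's own line, A's split()[1] classifies like B's whole remainder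
theorem pv_line_core (l : List Char) (hin : pvM <:+: l)
    (hbad : ¬ pvBadLine (l.drop ((PySem.Chars.find l pvM).toNat + 8))) :
    pvClassify (PySem.Chars.strip ((PySem.List.pyGet? (PySem.Chars.splitOn l pvM) 1).getD [])) =
    pvClassify (PySem.Chars.strip (l.drop ((PySem.Chars.find l pvM).toNat + 8))) := by
  have hnn : 0 ≤ PySem.Chars.find l pvM := (PySem.Chars.find_nonneg_iff _ _).mpr hin
  obtain ⟨hocc, hmin⟩ := PySem.Chars.find_spec hnn
  set i := (PySem.Chars.find l pvM).toNat with hidef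
  have hdt : l.drop i = pvM ++ l.drop (i + 8) := by
    obtain ⟨t, ht⟩ := hocc
    have ht2 : t = l.drop (i + 8) := by
      have h8 := congrArg (List.drop pvM.length) ht
      rw [List.drop_left] at h8
      rw [h8, List.drop_drop, pvM_len]
    rw [← ht, ht2]
  have hdec : l = l.take i ++ pvM ++ l.drop (i + 8) := by
    conv_lhs => rw [← List.take_append_drop i l, hdt]
    rw [List.append_assoc]
  have hsplit : PySem.Chars.splitOn l pvM = l.take i :: pvSplitF pvM (l.drop (i + 8)) := by
    rw [pv_splitOn_eq _ pvM_ne_nil]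
    conv_lhs => rw [hdec]
    apply pvSplitF_occ pvM pvM_ne_nil
    intro j hj
    rw [← hdec]
    have hjlt : j < i := by
      have : (l.take i).length ≤ i := by simp
      omega
    exact hmin j hjlt
  by_cases h2 : pvM <:+: l.drop (i + 8)
  · -- second marker on the line: use ¬pvBadLine
    have hbl : PySem.Chars.isIn pvM (l.drop (i + 8)) = true :=
      (PySem.Chars.isIn_iff_infix _ _).mpr h2
    have hhd : (PySem.Chars.strip ((l.drop (i + 8)).take
        (PySem.Chars.find (l.drop (i + 8)) pvM).toNat)).headD '?' ∈ (['0', '1'] : List Char) := by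
      by_contra hcon
      exact hbad ⟨hbl, hcon⟩
    have hnn2 : 0 ≤ PySem.Chars.find (l.drop (i + 8)) pvM :=
      (PySem.Chars.find_nonneg_iff _ _).mpr h2
    obtain ⟨hocc2, hmin2⟩ := PySem.Chars.find_spec hnn2
    set L1 := l.drop (i + 8) with hL1def
    set i2 := (PySem.Chars.find L1 pvM).toNat with hi2def
    have hdt2 : L1.drop i2 = pvM ++ L1.drop (i2 + 8) := by
      obtain ⟨t, ht⟩ := hocc2
      have ht2 : t = L1.drop (i2 + 8) := by
        have h8 := congrArg (List.drop pvM.length) ht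
        rw [List.drop_left] at h8
        rw [h8, List.drop_drop, pvM_len]
      rw [← ht, ht2]
    have hdec2 : L1 = L1.take i2 ++ pvM ++ L1.drop (i2 + 8) := by
      conv_lhs => rw [← List.take_append_drop i2 L1, hdt2]
      rw [List.append_assoc]
    have hsplit2 : pvSplitF pvM L1 = L1.take i2 :: pvSplitF pvM (L1.drop (i2 + 8)) := by
      conv_lhs => rw [hdec2]
      apply pvSplitF_occ pvM pvM_ne_nil
      intro j hj
      rw [← hdec2]
      have hjlt : j < i2 := by
        have : (L1.take i2).length ≤ i2 := by simp
        omega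
      exact hmin2 j hjlt
    rw [hsplit, hsplit2, pv_pyGet?_one, Option.getD_some]
    rcases hh : (PySem.Chars.strip (L1.take i2)).head? with _ | c
    · exfalso
      rw [List.headD_eq_head?_getD, hh] at hhd
      simp at hhd
    · have hc01 : c = '0' ∨ c = '1' := by
        rw [List.headD_eq_head?_getD, hh] at hhd
        simpa using hhd
      exact pv_classify_eq_of_head _ _ c hh (pv_strip_take_head L1 i2 c hh) hc01
  · rw [hsplit, pvSplitF_no_occ _ _ h2, pv_pyGet?_one, Option.getD_some]
-- splitting a response at its first newline
theorem pv_splitOnNl (l r : List Char) (hnl : '\n' ∉ l) :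
    PySem.Chars.splitOn (l ++ '\n' :: r) ['\n'] = l :: pvSplitF ['\n'] r := by
  rw [pv_splitOn_eq _ (by decide)]
  rw [show l ++ '\n' :: r = l ++ ['\n'] ++ r from by simp]
  apply pvSplitF_occ ['\n'] (by decide)
  intro j hj
  rw [show l ++ ['\n'] ++ r = l ++ '\n' :: r from by simp]
  rw [List.drop_append_of_le_length (by omega), pv_singleton_prefix]
  rcases hd : l.drop j with _ | ⟨a, t⟩
  · have := congrArg List.length hd
    simp at this
    omega
  · intro hcon
    simp at hcon
    apply hnl
    rw [← hcon]
    exact List.mem_of_mem_drop (by rw [hd]; simp)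

theorem pv_B_append (l r : List Char) (hnin : ¬ pvM <:+: l) :
    pvBC (l ++ '\n' :: r) = pvBC r := by
  by_cases hr : pvM <:+: r
  · have hfr : 0 ≤ PySem.Chars.find r pvM := (PySem.Chars.find_nonneg_iff _ _).mpr hr
    have hfs : PySem.Chars.find (l ++ '\n' :: r) pvM =
        (l.length : Int) + 1 + PySem.Chars.find r pvM := by
      rw [pv_find_append_skip pvM l r '\n' pvM_ne_nil pvM_no_nl hnin, if_pos hr]
    unfold pvBC
    rw [hfs, if_neg (by omega), if_neg (by omega)]
    congr 1
    have harith : ((l.length : Int) + 1 + PySem.Chars.find r pvM).toNat + 8 =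
        l.length + (1 + ((PySem.Chars.find r pvM).toNat + 8)) := by omega
    rw [harith, ← List.drop_drop, List.drop_left,
      Nat.add_comm 1 ((PySem.Chars.find r pvM).toNat + 8), List.drop_succ_cons]
  · have hfs : PySem.Chars.find (l ++ '\n' :: r) pvM = -1 := by
      rw [pv_find_append_skip pvM l r '\n' pvM_ne_nil pvM_no_nl hnin, if_neg hr]
    have hfr : PySem.Chars.find r pvM = -1 := (PySem.Chars.find_eq_neg_one_iff _ _).mpr hr
    unfold pvBC
    rw [hfs, hfr, if_pos (by omega), if_pos (by omega)]
-- reduction of both programs on the marker line (shared by equality and difference proofs)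
theorem pv_DC_single (s : List Char) (hnl : '\n' ∉ s) (hin : pvM <:+: s) :
    pvDC s ↔ pvBadLine (s.drop ((PySem.Chars.find s pvM).toNat + 8)) := by
  unfold pvDC
  have hnn : 0 ≤ PySem.Chars.find s pvM := (PySem.Chars.find_nonneg_iff _ _).mpr hin
  have hnonl : '\n' ∉ s.drop ((PySem.Chars.find s pvM).toNat + 8) :=
    fun hcon => hnl (List.mem_of_mem_drop hcon)
  rw [pv_takeWhile_all _ _ (fun a ha => by
    simp only [decide_eq_true_eq]
    intro hcon
    exact hnonl (hcon ▸ ha))]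
  exact and_iff_right hnn

theorem pv_DC_marker (l r : List Char) (hnl : '\n' ∉ l) (hin : pvM <:+: l) :
    pvDC (l ++ '\n' :: r) ↔ pvBadLine (l.drop ((PySem.Chars.find l pvM).toNat + 8)) := by
  have hnnl : 0 ≤ PySem.Chars.find l pvM := (PySem.Chars.find_nonneg_iff _ _).mpr hin
  have hfs : PySem.Chars.find (l ++ '\n' :: r) pvM = PySem.Chars.find l pvM :=
    pv_find_append_left pvM l r '\n' pvM_ne_nil pvM_no_nl hin
  obtain ⟨hocc, -⟩ := PySem.Chars.find_spec hnnl
  have hi8 : (PySem.Chars.find l pvM).toNat + 8 ≤ l.length := by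
    have h1 := hocc.length_le
    rw [pvM_len] at h1
    simp [List.length_drop] at h1
    omega
  have hnonl : '\n' ∉ l.drop ((PySem.Chars.find l pvM).toNat + 8) :=
    fun hcon => hnl (List.mem_of_mem_drop hcon)
  unfold pvDC
  rw [hfs, List.drop_append_of_le_length hi8]
  rw [pv_takeWhile_append_stop _ _ r '\n'
    (fun a ha => by
      simp only [decide_eq_true_eq]
      intro hcon
      exact hnonl (hcon ▸ ha))
    (by simp)]
  exact and_iff_right hnnl

theorem pv_single_red (s : List Char) (hnl : '\n' ∉ s) (hin : pvM <:+: s) :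
    pvAC s = pvClassify (PySem.Chars.strip
        ((PySem.List.pyGet? (PySem.Chars.splitOn s pvM) 1).getD [])) ∧
    pvBC s = pvClassify (PySem.Chars.strip
        (s.drop ((PySem.Chars.find s pvM).toNat + 8))) := by
  have hnn : 0 ≤ PySem.Chars.find s pvM := (PySem.Chars.find_nonneg_iff _ _).mpr hin
  constructor
  · unfold pvAC
    rw [(PySem.Chars.isIn_iff_infix pvM s).mpr hin, if_pos rfl,
      pv_splitOn_eq _ (by decide), pvSplitF_no_occ _ _ (pv_not_infix_singleton '\n' s hnl),
      pvLoopC, if_pos ((PySem.Chars.isIn_iff_infix pvM s).mpr hin)]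
  · unfold pvBC
    rw [if_neg (by omega)]
    have hnonl : '\n' ∉ s.drop ((PySem.Chars.find s pvM).toNat + 8) :=
      fun hcon => hnl (List.mem_of_mem_drop hcon)
    rw [pvBC2, pv_find_no_newline _ '\n' hnonl, if_pos rfl]

theorem pv_marker_red (l r : List Char) (hnl : '\n' ∉ l) (hin : pvM <:+: l) :
    pvAC (l ++ '\n' :: r) = pvClassify (PySem.Chars.strip
        ((PySem.List.pyGet? (PySem.Chars.splitOn l pvM) 1).getD [])) ∧
    pvBC (l ++ '\n' :: r) = pvClassify (PySem.Chars.strip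
        (l.drop ((PySem.Chars.find l pvM).toNat + 8))) := by
  have hnnl : 0 ≤ PySem.Chars.find l pvM := (PySem.Chars.find_nonneg_iff _ _).mpr hin
  have hfs : PySem.Chars.find (l ++ '\n' :: r) pvM = PySem.Chars.find l pvM :=
    pv_find_append_left pvM l r '\n' pvM_ne_nil pvM_no_nl hin
  obtain ⟨hocc, -⟩ := PySem.Chars.find_spec hnnl
  set i := (PySem.Chars.find l pvM).toNat with hidef
  have hi8 : i + 8 ≤ l.length := by
    have h1 := hocc.length_le
    rw [pvM_len] at h1
    simp [List.length_drop] at h1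
    omega
  have hnonl : '\n' ∉ l.drop (i + 8) := fun hcon => hnl (List.mem_of_mem_drop hcon)
  have hinfs : pvM <:+: l ++ '\n' :: r :=
    (pv_infix_append_cons pvM l r '\n' pvM_ne_nil pvM_no_nl).mpr (Or.inl hin)
  constructor
  · unfold pvAC
    rw [(PySem.Chars.isIn_iff_infix pvM _).mpr hinfs, if_pos rfl,
      pv_splitOnNl l r hnl, pvLoopC, if_pos ((PySem.Chars.isIn_iff_infix pvM l).mpr hin)]
  · unfold pvBC
    rw [if_neg (by rw [hfs]; omega), hfs, ← hidef, List.drop_append_of_le_length hi8, pvBC2,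
      pv_find_newline _ r '\n' hnonl, if_neg (by omega)]
    rw [show ((l.drop (i + 8)).length : Int).toNat = (l.drop (i + 8)).length from by omega,
      List.take_left]
theorem pv_A_append (l r : List Char) (hnl : '\n' ∉ l) (hnin : ¬ pvM <:+: l) :
    pvAC (l ++ '\n' :: r) = pvAC r := by
  unfold pvAC
  have hiff := pv_infix_append_cons pvM l r '\n' pvM_ne_nil pvM_no_nl
  by_cases hr : pvM <:+: r
  · have h1 : PySem.Chars.isIn pvM (l ++ '\n' :: r) = true :=
      (PySem.Chars.isIn_iff_infix _ _).mpr (hiff.mpr (Or.inr hr))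
    have h2 : PySem.Chars.isIn pvM r = true := (PySem.Chars.isIn_iff_infix _ _).mpr hr
    rw [h1, h2, if_pos rfl, if_pos rfl, pv_splitOnNl l r hnl, pvLoopC]
    rw [if_neg (by rw [(PySem.Chars.isIn_iff_infix pvM l)]; exact hnin)]
    rw [pv_splitOn_eq _ (by decide)]
  · have h1 : PySem.Chars.isIn pvM (l ++ '\n' :: r) = false :=
      (PySem.Chars.isIn_eq_false_iff _ _).mpr (fun hcon => by
        rcases hiff.mp hcon with h | h
        · exact hnin h
        · exact hr h)
    have h2 : PySem.Chars.isIn pvM r = false := (PySem.Chars.isIn_eq_false_iff _ _).mpr hr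
    rw [h1, h2]
    simp

theorem pv_D_append (l r : List Char) (hnin : ¬ pvM <:+: l) :
    pvDC (l ++ '\n' :: r) ↔ pvDC r := by
  unfold pvDC
  by_cases hr : pvM <:+: r
  · have hfr : 0 ≤ PySem.Chars.find r pvM := (PySem.Chars.find_nonneg_iff _ _).mpr hr
    have hfs : PySem.Chars.find (l ++ '\n' :: r) pvM =
        (l.length : Int) + 1 + PySem.Chars.find r pvM := by
      rw [pv_find_append_skip pvM l r '\n' pvM_ne_nil pvM_no_nl hnin, if_pos hr]
    have hdrop : (l ++ '\n' :: r).drop ((PySem.Chars.find (l ++ '\n' :: r) pvM).toNat + 8) =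
        r.drop ((PySem.Chars.find r pvM).toNat + 8) := by
      rw [hfs]
      have harith : ((l.length : Int) + 1 + PySem.Chars.find r pvM).toNat + 8 =
          l.length + (1 + ((PySem.Chars.find r pvM).toNat + 8)) := by omega
      rw [harith, ← List.drop_drop, List.drop_left,
        Nat.add_comm 1 ((PySem.Chars.find r pvM).toNat + 8), List.drop_succ_cons]
    rw [hdrop, hfs]
    constructor
    · rintro ⟨-, h⟩
      exact ⟨hfr, h⟩
    · rintro ⟨-, h⟩
      exact ⟨by omega, h⟩
  · have hfs : PySem.Chars.find (l ++ '\n' :: r) pvM = -1 := by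
      rw [pv_find_append_skip pvM l r '\n' pvM_ne_nil pvM_no_nl hnin, if_neg hr]
    have hfr : PySem.Chars.find r pvM = -1 := (PySem.Chars.find_eq_neg_one_iff _ _).mpr hr
    rw [hfs, hfr]
    constructor
    · rintro ⟨h, -⟩
      omega
    · rintro ⟨h, -⟩
      omega

theorem pv_single_line (s : List Char) (hnl : '\n' ∉ s) (hin : pvM <:+: s)
    (hnd : ¬ pvDC s) : pvAC s = pvBC s := by
  obtain ⟨h1, h2⟩ := pv_single_red s hnl hin
  rw [h1, h2]
  exact pv_line_core s hin (fun hb => hnd ((pv_DC_single s hnl hin).mpr hb))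

theorem pv_marker_line (l r : List Char) (hnl : '\n' ∉ l) (hin : pvM <:+: l)
    (hnd : ¬ pvDC (l ++ '\n' :: r)) : pvAC (l ++ '\n' :: r) = pvBC (l ++ '\n' :: r) := by
  obtain ⟨h1, h2⟩ := pv_marker_red l r hnl hin
  rw [h1, h2]
  exact pv_line_core l hin (fun hb => hnd ((pv_DC_marker l r hnl hin).mpr hb))

theorem pv_main : ∀ (n : Nat) (s : List Char), s.length ≤ n → ¬ pvDC s → pvAC s = pvBC s := by
  intro n
  induction n with
  | zero =>
    intro s hlen _
    have : s = [] := List.eq_nil_of_length_eq_zero (by omega)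
    subst this
    decide
  | succ n ih =>
    intro s hlen hnd
    by_cases hmem : '\n' ∈ s
    · set l := s.takeWhile (fun a => a ≠ '\n') with hl
      set d := s.dropWhile (fun a => a ≠ '\n') with hd
      have hs0 : l ++ d = s := List.takeWhile_append_dropWhile
      have hnll : '\n' ∉ l := by
        intro hcon
        have := List.mem_takeWhile_imp (hl ▸ hcon)
        simp at this
      have hdne : d ≠ [] := by
        intro hcon
        rw [hcon, List.append_nil] at hs0
        rw [← hs0] at hmem
        exact hnll hmem
      rcases hdd : d with _ | ⟨d0, r⟩
      · exact absurd hdd hdne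
      have hd0 : d0 = '\n' := by
        have h1 := List.head?_dropWhile_not (fun a => a ≠ '\n') s
        rw [← hd, hdd] at h1
        simp at h1
        exact h1
      have hs : s = l ++ '\n' :: r := by rw [← hs0, hdd, hd0]
      have hrlen : r.length ≤ n := by
        have := congrArg List.length hs
        simp at this
        omega
      by_cases hin : pvM <:+: l
      · rw [hs]
        exact pv_marker_line l r hnll hin (hs ▸ hnd)
      · rw [hs, pv_A_append l r hnll hin, pv_B_append l r hin]
        exact ih r hrlen (fun hcon => (hs ▸ hnd) ((pv_D_append l r hin).mpr hcon))
    · by_cases hin : pvM <:+: s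
      · exact pv_single_line s hmem hin hnd
      · unfold pvAC pvBC
        rw [(PySem.Chars.isIn_eq_false_iff pvM s).mpr hin,
          (PySem.Chars.find_eq_neg_one_iff s pvM).mpr hin]
        simp
theorem pv_take_le_takeWhile (p : Char → Bool) :
    ∀ (x : List Char) (n : Nat), n ≤ x.length →
      (∀ a ∈ x.take n, p a = true) → n ≤ (x.takeWhile p).length := by
  intro x
  induction x with
  | nil => intro n h _; simpa using h
  | cons c x' ih =>
    intro n hn hall
    cases n with
    | zero => omega
    | succ m =>
      have hc : p c = true := hall c (by simp)
      rw [List.takeWhile_cons, if_pos hc]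
      have := ih m (by simpa using hn) (fun a ha => hall a (by simp [ha]))
      simp
      omega

theorem pv_prefix_eq_take (x y : List Char) (h : x <+: y) : x = y.take x.length := by
  obtain ⟨u, hu⟩ := h
  rw [← hu, List.take_left]

theorem pvD_char_iff (s : List Char) :
    (2 < (PySem.Chars.splitOn s pvM).length ∧
     '\n' ∉ (PySem.Chars.splitOn s pvM).getD 1 [] ∧
     (PySem.Chars.strip ((PySem.Chars.splitOn s pvM).getD 1 [])).headD '?' ∉
       (['0', '1'] : List Char)) ↔ pvDC s := by
  by_cases hin : pvM <:+: s
  · have hnn : 0 ≤ PySem.Chars.find s pvM := (PySem.Chars.find_nonneg_iff _ _).mpr hin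
    obtain ⟨hocc, hmin⟩ := PySem.Chars.find_spec hnn
    set i := (PySem.Chars.find s pvM).toNat with hidef
    have hdt : s.drop i = pvM ++ s.drop (i + 8) := by
      obtain ⟨t, ht⟩ := hocc
      have ht2 : t = s.drop (i + 8) := by
        have h8 := congrArg (List.drop pvM.length) ht
        rw [List.drop_left] at h8
        rw [h8, List.drop_drop, pvM_len]
      rw [← ht, ht2]
    have hdec : s = s.take i ++ pvM ++ s.drop (i + 8) := by
      conv_lhs => rw [← List.take_append_drop i s, hdt]
      rw [List.append_assoc]
    have hsplit : PySem.Chars.splitOn s pvM = s.take i :: pvSplitF pvM (s.drop (i + 8)) := by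
      rw [pv_splitOn_eq _ pvM_ne_nil]
      conv_lhs => rw [hdec]
      apply pvSplitF_occ pvM pvM_ne_nil
      intro j hj
      rw [← hdec]
      exact hmin j (lt_of_lt_of_le hj (by simp))
    set L1 := s.drop (i + 8) with hL1def
    set line := L1.takeWhile (fun a => a ≠ '\n') with hlinedef
    have hlpre : line <+: L1 := List.takeWhile_prefix _
    have hDC : pvDC s ↔ (PySem.Chars.isIn pvM line = true ∧
        (PySem.Chars.strip (line.take (PySem.Chars.find line pvM).toNat)).headD '?' ∉
          (['0', '1'] : List Char)) := by
      unfold pvDC pvBadLine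
      constructor
      · rintro ⟨-, h⟩; exact h
      · intro h; exact ⟨hnn, h⟩
    rw [hDC]
    by_cases h2 : pvM <:+: L1
    · have hnn2 : 0 ≤ PySem.Chars.find L1 pvM := (PySem.Chars.find_nonneg_iff _ _).mpr h2
      obtain ⟨hocc2, hmin2⟩ := PySem.Chars.find_spec hnn2
      set i2 := (PySem.Chars.find L1 pvM).toNat with hi2def
      have hdt2 : L1.drop i2 = pvM ++ L1.drop (i2 + 8) := by
        obtain ⟨t, ht⟩ := hocc2
        have ht2 : t = L1.drop (i2 + 8) := by
          have h8 := congrArg (List.drop pvM.length) ht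
          rw [List.drop_left] at h8
          rw [h8, List.drop_drop, pvM_len]
        rw [← ht, ht2]
      have hdec2 : L1 = L1.take i2 ++ pvM ++ L1.drop (i2 + 8) := by
        conv_lhs => rw [← List.take_append_drop i2 L1, hdt2]
        rw [List.append_assoc]
      have hsplit2 : pvSplitF pvM L1 = L1.take i2 :: pvSplitF pvM (L1.drop (i2 + 8)) := by
        conv_lhs => rw [hdec2]
        apply pvSplitF_occ pvM pvM_ne_nil
        intro j hj
        rw [← hdec2]
        exact hmin2 j (lt_of_lt_of_le hj (by simp))
      have hi2le : i2 + 8 ≤ L1.length := by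
        have h1 := hocc2.length_le
        rw [pvM_len] at h1
        simp [List.length_drop] at h1
        omega
      have hlen2 : (L1.take i2).length = i2 := by simp; omega
      have htk : L1.take (i2 + 8) = L1.take i2 ++ pvM := by
        have hpre : L1.take i2 ++ pvM <+: L1 := ⟨L1.drop (i2 + 8), hdec2.symm⟩
        have h := pv_prefix_eq_take _ _ hpre
        rw [List.length_append, hlen2, pvM_len] at h
        exact h.symm
      rw [hsplit, hsplit2]
      have hlenpos : 2 < (s.take i :: L1.take i2 :: pvSplitF pvM (L1.drop (i2 + 8))).length := by
        have := pvSplitF_ne_nil pvM (L1.drop (i2 + 8))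
        have := List.length_pos_iff.mpr this
        simp
        omega
      have hgetD : (s.take i :: L1.take i2 :: pvSplitF pvM (L1.drop (i2 + 8))).getD 1 [] =
          L1.take i2 := by simp [List.getD]
      rw [hgetD]
      constructor
      · rintro ⟨-, hnlt, hhd⟩
        -- the second marker sits on the same line
        have hk : i2 + 8 ≤ line.length := by
          apply pv_take_le_takeWhile _ L1 (i2 + 8) hi2le
          intro a ha
          rw [htk] at ha
          simp only [decide_eq_true_eq]
          intro hcon
          subst hcon
          rcases List.mem_append.mp ha with h | h
          · exact hnlt h
          · exact pvM_no_nl h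
        have hlineq : line = L1.take line.length := pv_prefix_eq_take _ _ hlpre
        have hoccl : pvM <+: line.drop i2 := by
          rw [hlineq, List.drop_take]
          exact List.prefix_take_iff.mpr ⟨hocc2, by rw [pvM_len]; omega⟩
        have hfl : PySem.Chars.find line pvM = (i2 : Int) := by
          apply pv_find_eq_coe _ _ _ hoccl
          intro j hj hcon
          exact hmin2 j hj (hcon.trans ((hlpre.drop j).trans (List.prefix_refl _)))
        have htke : line.take i2 = L1.take i2 := by
          rw [hlineq, List.take_take, min_eq_left (by omega)]
        refine ⟨(PySem.Chars.isIn_iff_infix _ _).mpr ((pv_infix_iff _ _).mpr ⟨i2, hoccl⟩), ?_⟩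
        rw [hfl, Int.toNat_natCast, htke]
        exact hhd
      · rintro ⟨hisin, hhd⟩
        have hinfl : pvM <:+: line := (PySem.Chars.isIn_iff_infix _ _).mp hisin
        have hnnl : 0 ≤ PySem.Chars.find line pvM := (PySem.Chars.find_nonneg_iff _ _).mpr hinfl
        obtain ⟨hoccl, hminl⟩ := PySem.Chars.find_spec hnnl
        set j' := (PySem.Chars.find line pvM).toNat with hj'def
        have hj'k : j' + 8 ≤ line.length := by
          have h1 := hoccl.length_le
          rw [pvM_len] at h1
          simp [List.length_drop] at h1
          omega
        have hoccL1 : pvM <+: L1.drop j' := hoccl.trans (hlpre.drop j')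
        have hile : i2 ≤ j' := by
          by_contra hcon
          exact hmin2 j' (by omega) hoccL1
        have heq : i2 = j' := by
          by_contra hne
          have hlt : i2 < j' := by omega
          have hlineq : line = L1.take line.length := pv_prefix_eq_take _ _ hlpre
          have hoccl2 : pvM <+: line.drop i2 := by
            rw [hlineq, List.drop_take]
            exact List.prefix_take_iff.mpr ⟨hocc2, by rw [pvM_len]; omega⟩
          exact hminl i2 hlt hoccl2
        have hlineq : line = L1.take line.length := pv_prefix_eq_take _ _ hlpre
        have htke : line.take j' = L1.take i2 := by
          rw [hlineq, List.take_take, min_eq_left (by omega), heq]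
        refine ⟨hlenpos, ?_, ?_⟩
        · intro hcon
          rw [← htke] at hcon
          have hmem : '\n' ∈ line := List.mem_of_mem_take hcon
          have := List.mem_takeWhile_imp hmem
          simp at this
        · rw [← htke]
          exact hhd
    · have h1 : pvSplitF pvM L1 = [L1] := pvSplitF_no_occ _ _ h2
      rw [hsplit, h1]
      have hisinf : PySem.Chars.isIn pvM line = false := by
        rw [PySem.Chars.isIn_eq_false_iff]
        intro hcon
        exact h2 (hcon.trans hlpre.isInfix)
      simp [hisinf]
  · have h1 : PySem.Chars.splitOn s pvM = [s] := by
      rw [pv_splitOn_eq _ pvM_ne_nil]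
      exact pvSplitF_no_occ _ _ hin
    have hf : PySem.Chars.find s pvM = -1 := (PySem.Chars.find_eq_neg_one_iff _ _).mpr hin
    unfold pvDC
    rw [h1, hf]
    simp
theorem pv_rstrip_eq_nil_iff (y : List Char) :
    PySem.Chars.rstrip y = [] ↔ ∀ a ∈ y, PySem.Chars.isspace a = true := by
  rw [PySem.Chars.rstrip, List.reverse_eq_nil_iff, List.dropWhile_eq_nil_iff]
  constructor
  · intro h a ha
    exact h a (by simp [ha])
  · intro h a ha
    exact h a (by simp at ha; exact ha)

theorem pv_rstrip_append (x y : List Char) (h : PySem.Chars.rstrip y ≠ []) :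
    PySem.Chars.rstrip (x ++ y) = x ++ PySem.Chars.rstrip y := by
  rw [PySem.Chars.rstrip, PySem.Chars.rstrip] at *
  rw [List.reverse_append, List.dropWhile_append]
  have h' : ¬ (List.dropWhile PySem.Chars.isspace y.reverse).isEmpty = true := by
    intro hcon
    rw [List.isEmpty_iff] at hcon
    apply h
    rw [hcon]
    rfl
  rw [if_neg h', List.reverse_append, List.reverse_reverse]

theorem pv_dropWhile_id (p : Char → Bool) (x : List Char) (c : Char)
    (hh : x.head? = some c) (hc : p c = false) : List.dropWhile p x = x := by
  cases x with
  | nil => simp at hh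
  | cons a t =>
    simp at hh
    subst hh
    rw [List.dropWhile_cons, if_neg (by simp [hc])]

theorem pv_status_ne (t u : List Char) (hlen : t.length ≠ u.length) :
    ("Status: " ++ String.ofList t) ≠ ("Status: " ++ String.ofList u) := by
  intro h
  apply hlen
  have h2 := congrArg String.toList h
  rw [String.toList_append, String.toList_append] at h2
  simp at h2
  rw [h2]

theorem pv_classify_status (t : List Char) (h : t.headD '?' ∉ (['0', '1'] : List Char)) :
    pvClassify t = "Status: " ++ String.ofList t := by
  unfold pvClassify
  have hx : ∀ d : Char, d ∈ (['0', '1'] : List Char) → ¬ PySem.Chars.startswith t [d] = true := by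
    intro d hd hcon
    rw [PySem.Chars.startswith_iff, pv_singleton_prefix] at hcon
    rw [List.headD_eq_head?_getD, hcon] at h
    simp at h hd
    rcases hd with rfl | rfl
    · exact h.1 rfl
    · exact h.2 rfl
  rw [if_neg (hx '0' (by simp)), if_neg (hx '1' (by simp))]

theorem pv_split_at_first (x : List Char) (hin : pvM <:+: x) :
    PySem.Chars.splitOn x pvM =
      x.take (PySem.Chars.find x pvM).toNat ::
        pvSplitF pvM (x.drop ((PySem.Chars.find x pvM).toNat + 8)) ∧
    x.drop (PySem.Chars.find x pvM).toNat = pvM ++ x.drop ((PySem.Chars.find x pvM).toNat + 8) := by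
  have hnn : 0 ≤ PySem.Chars.find x pvM := (PySem.Chars.find_nonneg_iff _ _).mpr hin
  obtain ⟨hocc, hmin⟩ := PySem.Chars.find_spec hnn
  set i := (PySem.Chars.find x pvM).toNat with hidef
  have hdt : x.drop i = pvM ++ x.drop (i + 8) := by
    obtain ⟨t, ht⟩ := hocc
    have ht2 : t = x.drop (i + 8) := by
      have h8 := congrArg (List.drop pvM.length) ht
      rw [List.drop_left] at h8
      rw [h8, List.drop_drop, pvM_len]
    rw [← ht, ht2]
  refine ⟨?_, hdt⟩
  have hdec : x = x.take i ++ pvM ++ x.drop (i + 8) := by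
    conv_lhs => rw [← List.take_append_drop i x, hdt]
    rw [List.append_assoc]
  rw [pv_splitOn_eq _ pvM_ne_nil]
  conv_lhs => rw [hdec]
  apply pvSplitF_occ pvM pvM_ne_nil
  intro j hj
  rw [← hdec]
  exact hmin j (lt_of_lt_of_le hj (by simp))

theorem pv_line_diff (l : List Char) (hin : pvM <:+: l)
    (hb : pvBadLine (l.drop ((PySem.Chars.find l pvM).toNat + 8))) :
    pvClassify (PySem.Chars.strip ((PySem.List.pyGet? (PySem.Chars.splitOn l pvM) 1).getD [])) ≠
    pvClassify (PySem.Chars.strip (l.drop ((PySem.Chars.find l pvM).toNat + 8))) := by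
  obtain ⟨hbl, hhd⟩ := hb
  obtain ⟨hsp, -⟩ := pv_split_at_first l hin
  set L1 := l.drop ((PySem.Chars.find l pvM).toNat + 8) with hL1def
  have h2 : pvM <:+: L1 := (PySem.Chars.isIn_iff_infix _ _).mp hbl
  obtain ⟨hsp2, hdt2⟩ := pv_split_at_first L1 h2
  set i2 := (PySem.Chars.find L1 pvM).toNat with hi2def
  have hsplit2 : pvSplitF pvM L1 = L1.take i2 :: pvSplitF pvM (L1.drop (i2 + 8)) := by
    rw [← pv_splitOn_eq _ pvM_ne_nil]
    exact hsp2
  rw [hsp, hsplit2, pv_pyGet?_one, Option.getD_some]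
  have hyhead : (L1.drop i2).head? = some '+' := by
    rw [hdt2, show pvM = '+' :: "UNTWST:".toList from rfl]
    simp
  have hplusmem : '+' ∈ L1.drop i2 := by
    rcases hy : L1.drop i2 with _ | ⟨a, w⟩
    · rw [hy] at hyhead; simp at hyhead
    · rw [hy] at hyhead; simp at hyhead; simp [hy, hyhead]
  have hry : PySem.Chars.rstrip (L1.drop i2) ≠ [] := by
    intro hcon
    rw [pv_rstrip_eq_nil_iff] at hcon
    exact absurd (hcon '+' hplusmem) (by decide)
  by_cases hlt : PySem.Chars.lstrip (L1.take i2) = []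
  · have ht : PySem.Chars.strip (L1.take i2) = [] := by
      rw [PySem.Chars.strip, hlt]
      rfl
    have hls : PySem.Chars.lstrip L1 = L1.drop i2 := by
      conv_lhs => rw [show L1 = L1.take i2 ++ L1.drop i2 from (List.take_append_drop i2 L1).symm]
      rw [PySem.Chars.lstrip, List.dropWhile_append]
      rw [if_pos (by
        rw [show List.dropWhile PySem.Chars.isspace (L1.take i2) =
          PySem.Chars.lstrip (L1.take i2) from rfl, hlt]
        rfl)]
      exact pv_dropWhile_id _ _ '+' hyhead (by decide)
    have hstrip : PySem.Chars.strip L1 = PySem.Chars.rstrip (L1.drop i2) := by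
      rw [PySem.Chars.strip, hls]
    have hsne : PySem.Chars.strip L1 ≠ [] := by
      rw [hstrip]
      exact hry
    have hhead : (PySem.Chars.strip L1).head? = some '+' := by
      rw [hstrip, ← pv_prefix_head _ _ (pv_rstrip_prefix _) hry, hyhead]
    rw [ht, pv_classify_status [] (by decide),
      pv_classify_status _ (by rw [List.headD_eq_head?_getD, hhead]; decide)]
    apply pv_status_ne
    have := List.length_pos_iff.mpr hsne
    simp
    omega
  · have hlhd : ∃ a w, PySem.Chars.lstrip (L1.take i2) = a :: w := by
      rcases hl : PySem.Chars.lstrip (L1.take i2) with _ | ⟨a, w⟩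
      · exact absurd hl hlt
      · exact ⟨a, w, rfl⟩
    obtain ⟨a, w, hl⟩ := hlhd
    have hasp : PySem.Chars.isspace a = false :=
      pv_head_dropWhile _ (L1.take i2) a (by
        rw [show List.dropWhile PySem.Chars.isspace (L1.take i2) =
          PySem.Chars.lstrip (L1.take i2) from rfl, hl]
        rfl)
    have htne : PySem.Chars.strip (L1.take i2) ≠ [] := by
      rw [PySem.Chars.strip, hl]
      exact pv_rstrip_ne_nil _ a (by simp) hasp
    have hls : PySem.Chars.lstrip L1 = PySem.Chars.lstrip (L1.take i2) ++ L1.drop i2 := by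
      conv_lhs => rw [show L1 = L1.take i2 ++ L1.drop i2 from (List.take_append_drop i2 L1).symm]
      exact pv_lstrip_append _ _ hlt
    have hstrip : PySem.Chars.strip L1 =
        PySem.Chars.lstrip (L1.take i2) ++ PySem.Chars.rstrip (L1.drop i2) := by
      rw [PySem.Chars.strip, hls, pv_rstrip_append _ _ hry]
    have hhe : (PySem.Chars.strip L1).head? = (PySem.Chars.strip (L1.take i2)).head? := by
      rw [hstrip, PySem.Chars.strip, hl]
      have hrne : PySem.Chars.rstrip (a :: w) ≠ [] := pv_rstrip_ne_nil _ a (by simp) hasp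
      rw [← pv_prefix_head _ _ (pv_rstrip_prefix (a :: w)) hrne]
      simp
    rw [pv_classify_status _ hhd,
      pv_classify_status _ (by
        rw [List.headD_eq_head?_getD, hhe, ← List.headD_eq_head?_getD]
        exact hhd)]
    apply pv_status_ne
    have hle : (PySem.Chars.strip (L1.take i2)).length ≤
        (PySem.Chars.lstrip (L1.take i2)).length := by
      rw [PySem.Chars.strip]
      exact (pv_rstrip_prefix _).length_le
    have hpos : 1 ≤ (PySem.Chars.rstrip (L1.drop i2)).length := List.length_pos_iff.mpr hry
    rw [hstrip, List.length_append]
    omega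
theorem pv_diff : ∀ (n : Nat) (s : List Char), s.length ≤ n → pvDC s → pvAC s ≠ pvBC s := by
  intro n
  induction n with
  | zero =>
    intro s hlen hD
    have : s = [] := List.eq_nil_of_length_eq_zero (by omega)
    subst this
    obtain ⟨h0, -⟩ := hD
    rw [show PySem.Chars.find [] pvM = -1 from by decide] at h0
    omega
  | succ n ih =>
    intro s hlen hD
    by_cases hmem : '\n' ∈ s
    · set l := s.takeWhile (fun a => a ≠ '\n') with hl
      set d := s.dropWhile (fun a => a ≠ '\n') with hd
      have hs0 : l ++ d = s := List.takeWhile_append_dropWhile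
      have hnll : '\n' ∉ l := by
        intro hcon
        have := List.mem_takeWhile_imp (hl ▸ hcon)
        simp at this
      have hdne : d ≠ [] := by
        intro hcon
        rw [hcon, List.append_nil] at hs0
        rw [← hs0] at hmem
        exact hnll hmem
      rcases hdd : d with _ | ⟨d0, r⟩
      · exact absurd hdd hdne
      have hd0 : d0 = '\n' := by
        have h1 := List.head?_dropWhile_not (fun a => a ≠ '\n') s
        rw [← hd, hdd] at h1
        simp at h1
        exact h1
      have hs : s = l ++ '\n' :: r := by rw [← hs0, hdd, hd0]
      have hrlen : r.length ≤ n := by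
        have := congrArg List.length hs
        simp at this
        omega
      by_cases hin : pvM <:+: l
      · rw [hs]
        obtain ⟨h1, h2⟩ := pv_marker_red l r hnll hin
        rw [h1, h2]
        exact pv_line_diff l hin ((pv_DC_marker l r hnll hin).mp (hs ▸ hD))
      · rw [hs, pv_A_append l r hnll hin, pv_B_append l r hin]
        exact ih r hrlen ((pv_D_append l r hin).mp (hs ▸ hD))
    · by_cases hin : pvM <:+: s
      · obtain ⟨h1, h2⟩ := pv_single_red s hmem hin
        rw [h1, h2]
        exact pv_line_diff s hin ((pv_DC_single s hmem hin).mp hD)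
      · exfalso
        have hf : PySem.Chars.find s pvM = -1 := (PySem.Chars.find_eq_neg_one_iff _ _).mpr hin
        obtain ⟨h0, -⟩ := hD
        rw [hf] at h0
        omega

theorem pvD_iff (r : String) : D_parse_wifi_status_py r ↔ pvDC r.toList :=
  pvD_char_iff r.toList

-- ===== VERDICT (by name: the statement is the Claim_ definition above) =====
theorem parse_wifi_status_py_spec : Claim_unchanged_parse_wifi_status_py := by
  intro response _
  intro hD
  rw [pv_A_eq, pv_B_eq]
  exact pv_main response.toList.length response.toList le_rfl
    (fun h => hD ((pvD_iff response).mpr h))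

theorem parse_wifi_status_py_changed : Claim_changed_parse_wifi_status_py := by
  unfold Claim_changed_parse_wifi_status_py; decide

theorem parse_wifi_status_py_tight : Claim_exact_parse_wifi_status_py := by
  intro response _ hD
  rw [pv_A_eq, pv_B_eq]
  exact pv_diff response.toList.length response.toList le_rfl ((pvD_iff response).mp hD)
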